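-- pv_equiv track=rewrite | github.com/jhenderson33/NirmanAI | src/tender/chunk.py | _split_at_boundary
-- ===== SOURCE A (Python) =====
-- def _split_at_boundary(text: str, max_chars: int) -> list[str]:
--     """
--     Split *text* into segments of at most *max_chars* characters,
--     preferring to break at a newline boundary rather than mid-line.
--     """
--     chunks: list[str] = []
--     start = 0
--     length = len(text)
--     while start < length:
--         end = min(start + max_chars, length)
--         if end < length:
--             # Try to find a newline to break at cleanly
--             newline_pos = text.rfind("\n", start, end)
--             if newline_pos > start:
--                 end = newline_pos + 1  # include the newline in this chunk
--         chunks.append(text[start:end])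
--         start = end
--     return chunks
-- ===== SOURCE B (Python) =====
-- def _split_at_boundary(text: str, max_chars: int) -> list[str]:
--     """Same contract as A: chunks of at most max_chars chars, preferring to
--     break just after a newline.  Instead of rfind-scanning every window, we
--     collect all newline positions once and binary-search each window's cap."""
--     newlines = [i for i, ch in enumerate(text) if ch == "\n"]
--     length = len(text)
--     chunks: list[str] = []
--     start = 0
--     while start < length:
--         cap = min(start + max_chars, length)
--         if cap == length:
--             end = length
--         else:
--             # lo = number of newline positions < cap (hand-rolled bisect_left)
--             lo, hi = 0, len(newlines)
--             while lo < hi: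
--                 mid = (lo + hi) // 2
--                 if newlines[mid] < cap:
--                     lo = mid + 1
--                 else:
--                     hi = mid
--             end = cap
--             if lo > 0:
--                 p = newlines[lo - 1]
--                 if p > start:
--                     end = p + 1
--         chunks.append(text[start:end])
--         start = end
--     return chunks
-- ===== Notes on version B (the rewrite author's own statement) =====
-- stated objective: alternative
-- what changed: B precomputes all newline positions in one pass and finds each window's break with a hand-rolled binary search (bisect_left), instead of A's per-window str.rfind scan.
import Mathlib
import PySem

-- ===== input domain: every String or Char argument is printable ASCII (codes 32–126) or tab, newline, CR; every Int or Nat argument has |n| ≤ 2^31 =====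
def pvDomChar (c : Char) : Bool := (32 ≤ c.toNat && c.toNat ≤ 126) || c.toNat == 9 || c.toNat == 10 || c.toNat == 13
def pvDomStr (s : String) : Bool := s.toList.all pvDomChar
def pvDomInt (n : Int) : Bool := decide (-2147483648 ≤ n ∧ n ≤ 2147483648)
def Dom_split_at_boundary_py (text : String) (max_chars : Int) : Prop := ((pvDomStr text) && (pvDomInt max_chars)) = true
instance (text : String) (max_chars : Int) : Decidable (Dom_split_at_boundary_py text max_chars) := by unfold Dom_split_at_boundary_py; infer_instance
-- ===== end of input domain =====

-- B replaces A's per-window rfind scan by one pass collecting newline positions plus a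
-- binary search per chunk (objective: alternative decomposition; equal return values proved below).

-- ===== PORT A =====
-- fuel-bounded transcription of A's while loop (the fuel only makes the recursion total;
-- inside Pre_ the loop terminates within the given fuel)
def splitA_go (text : String) (max_chars : Int) (start : Int) : Nat → List String
  | 0 => []
  | fuel+1 =>
    let length := PySem.Str.len text
    if start < length then
      let e0 := min (start + max_chars) length
      let e1 :=
        if e0 < length then
          let newline_pos := PySem.Str.rfindFrom text "\n" start (some e0)
          if start < newline_pos then newline_pos + 1 else e0
        else e0
      PySem.Str.slice text (some start) (some e1) :: splitA_go text max_chars e1 fuel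
    else []

def split_at_boundary_py (text : String) (max_chars : Int) : List String :=
  splitA_go text max_chars 0 (text.toList.length + 1)

-- ===== PORT B =====
-- newlines = [i for i, ch in enumerate(text) if ch == "\n"]
def newlinePositions (text : String) : List Int :=
  (PySem.List.enumerate text.toList).filterMap (fun p => if p.2 = '\n' then some p.1 else none)

-- the hand-rolled bisect_left loop of Source B: first index in [lo,hi) whose entry is ≥ cap
def bsearchB (nl : List Int) (cap : Int) (lo hi : Nat) : Nat :=
  if h : lo < hi then
    let mid := (lo + hi) / 2
    if nl.getD mid 0 < cap then bsearchB nl cap (mid+1) hi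
    else bsearchB nl cap lo mid
  else lo
termination_by hi - lo
decreasing_by all_goals omega

def splitB_go (text : String) (nl : List Int) (max_chars : Int) (start : Int) : Nat → List String
  | 0 => []
  | fuel+1 =>
    let length := PySem.Str.len text
    if start < length then
      let cap := min (start + max_chars) length
      let e1 :=
        if cap == length then length
        else
          let lo := bsearchB nl cap 0 nl.length
          if 0 < lo then
            let p := nl.getD (lo - 1) 0
            if start < p then p + 1 else cap
          else cap
      PySem.Str.slice text (some start) (some e1) :: splitB_go text nl max_chars e1 fuel
    else []

def split_at_boundary_py_alt (text : String) (max_chars : Int) : List String :=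
  splitB_go text (newlinePositions text) max_chars 0 (text.toList.length + 1)

-- ===== PRECONDITION & SPEC =====
-- Pre_ excludes only inputs on which Python A DIVERGES: with nonempty text and
-- max_chars ≤ 0 the window end never advances past start, so A's while loop never ends.
def Pre_split_at_boundary_py (text : String) (max_chars : Int) : Prop :=
  text = "" ∨ 1 ≤ max_chars
instance (text : String) (max_chars : Int) : Decidable (Pre_split_at_boundary_py text max_chars) := by
  unfold Pre_split_at_boundary_py; infer_instance

def pvWitness_split_at_boundary_py : String × Int := ("ab\ncd\nef", 4)

def Spec_split_at_boundary_py (text : String) (max_chars : Int) (out : List String) : Prop :=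
  out = split_at_boundary_py_alt text max_chars
instance (text : String) (max_chars : Int) (out : List String) : Decidable (Spec_split_at_boundary_py text max_chars out) := by
  unfold Spec_split_at_boundary_py; infer_instance

-- ===== CLAIM (what is proved, stated in full; the proofs are below) =====
def Claim_equal_split_at_boundary_py : Prop := ∀ (text : String) (max_chars : Int), Dom_split_at_boundary_py text max_chars → Pre_split_at_boundary_py text max_chars → Spec_split_at_boundary_py text max_chars (split_at_boundary_py text max_chars)

-- ===== LEMMAS AND PROOFS =====

-- the intended end of a non-final window [s, c): one past the last newline strictly
-- inside (s, c) if any, else c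
def refEnd (cs : List Char) (s c : Nat) : Int :=
  match ((List.range c).filter (fun i => decide (s < i) && decide (cs[i]? = some '\n'))).max? with
  | some m => (m : Int) + 1
  | none => (c : Int)

theorem refEnd_nonneg (cs : List Char) (s c : Nat) : 0 ≤ refEnd cs s c := by
  unfold refEnd
  cases ((List.range c).filter (fun i => decide (s < i) && decide (cs[i]? = some '\n'))).max? with
  | none => exact Int.natCast_nonneg c
  | some m => simp only []; omega

theorem refEnd_none (cs : List Char) (s c : Nat)
    (h : ∀ i : Nat, s < i → i < c → cs[i]? ≠ some '\n') : refEnd cs s c = (c : Int) := by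
  unfold refEnd
  have : (List.range c).filter (fun i => decide (s < i) && decide (cs[i]? = some '\n')) = [] := by
    rw [List.filter_eq_nil_iff]
    intro i hi
    simp only [List.mem_range] at hi
    simp only [Bool.and_eq_true, decide_eq_true_eq, not_and]
    intro hs
    exact h i hs hi
  rw [this]
  rfl

theorem refEnd_some (cs : List Char) (s c m : Nat) (h1 : s < m) (h2 : m < c)
    (h3 : cs[m]? = some '\n')
    (h4 : ∀ i : Nat, s < i → i < c → cs[i]? = some '\n' → i ≤ m) :
    refEnd cs s c = (m : Int) + 1 := by
  unfold refEnd
  have : ((List.range c).filter (fun i => decide (s < i) && decide (cs[i]? = some '\n'))).max? = some m := by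
    rw [List.max?_eq_some_iff]
    constructor
    · simp only [List.mem_filter, List.mem_range, Bool.and_eq_true, decide_eq_true_eq]
      exact ⟨h2, h1, h3⟩
    · intro b hb
      simp only [List.mem_filter, List.mem_range, Bool.and_eq_true, decide_eq_true_eq] at hb
      exact h4 b hb.2.1 hb.1 hb.2.2
  rw [this]

theorem singleton_prefix_iff (c : Char) (l : List Char) : [c] <+: l ↔ l.head? = some c := by
  cases l with
  | nil => simp
  | cons a t => simp [List.cons_prefix_cons, eq_comm]

theorem rfind_go_spec : ∀ (i : Nat) (cs : List Char),
    (PySem.Chars.rfind.go cs ['\n'] i = -1 ∧ ∀ j : Nat, j ≤ i → cs[j]? ≠ some '\n')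
    ∨ (∃ j : Nat, j ≤ i ∧ PySem.Chars.rfind.go cs ['\n'] i = (j : Int) ∧ cs[j]? = some '\n'
        ∧ ∀ j' : Nat, j < j' → j' ≤ i → cs[j']? ≠ some '\n') := by
  intro i
  induction i with
  | zero =>
    intro cs
    by_cases h : cs[0]? = some '\n'
    · right
      refine ⟨0, le_rfl, ?_, h, by omega⟩
      simp [PySem.Chars.rfind.go, List.isPrefixOf_iff_prefix, singleton_prefix_iff,
        ← List.head?_eq_getElem?] at h ⊢
      simp [h]
    · left
      constructor
      · simp [PySem.Chars.rfind.go, List.isPrefixOf_iff_prefix, singleton_prefix_iff,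
          ← List.head?_eq_getElem?] at h ⊢
        intro hc; exact absurd hc h
      · intro j hj; interval_cases j; exact h
  | succ i ih =>
    intro cs
    by_cases h : cs[i+1]? = some '\n'
    · right
      refine ⟨i+1, le_rfl, ?_, h, by omega⟩
      have : ['\n'].isPrefixOf (cs.drop (i+1)) = true := by
        rw [List.isPrefixOf_iff_prefix, singleton_prefix_iff, List.head?_drop]; exact h
      simp [PySem.Chars.rfind.go, this]
    · have hpre : ¬ ['\n'].isPrefixOf (cs.drop (i+1)) = true := by
        rw [List.isPrefixOf_iff_prefix, singleton_prefix_iff, List.head?_drop]; exact h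
      have hstep : PySem.Chars.rfind.go cs ['\n'] (i+1) = PySem.Chars.rfind.go cs ['\n'] i := by
        simp [PySem.Chars.rfind.go, hpre]
      rcases ih cs with ⟨h1, h2⟩ | ⟨j, hj, hgo, hnl, hmax⟩
      · left
        refine ⟨hstep.trans h1, fun j hj => ?_⟩
        rcases Nat.lt_or_ge j (i+1) with hlt | hge
        · exact h2 j (by omega)
        · have : j = i + 1 := by omega
          subst this; exact h
      · right
        refine ⟨j, by omega, hstep.trans hgo, hnl, fun j' h1 h2 => ?_⟩
        rcases Nat.lt_or_ge j' (i+1) with hlt | hge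
        · exact hmax j' h1 (by omega)
        · have : j' = i + 1 := by omega
          subst this; exact h

theorem rfindFrom_unfold (text : String) (s c : Nat) (hsc : s ≤ c)
    (hcl : c ≤ text.toList.length) :
    PySem.Str.rfindFrom text "\n" (s:Int) (some (c:Int)) =
    (if PySem.Chars.rfind ((text.toList.take c).drop s) ['\n'] = -1 then -1
     else (s:Int) + PySem.Chars.rfind ((text.toList.take c).drop s) ['\n']) := by
  rw [PySem.Str.rfindFrom_eq]
  show (let n : Int := text.toList.length
        let e := if (n:Int) < (c:Int) then n else if (c:Int) < 0 then (if (c:Int) + n < 0 then 0 else (c:Int)+n) else (c:Int)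
        let st := if (s:Int) < 0 then (if (s:Int) + n < 0 then 0 else (s:Int)+n) else (s:Int)
        if e < st then -1
        else
          let r := PySem.Chars.rfind (List.drop st.toNat (List.take e.toNat text.toList)) "\n".toList
          if r = -1 then -1 else st + r) = _
  have h1 : ¬ ((text.toList.length : Int) < (c : Int)) := by exact_mod_cast not_lt.2 hcl
  have h2 : ¬ ((c:Int) < 0) := by omega
  have h3 : ¬ ((s:Int) < 0) := by omega
  have h4 : ¬ ((c:Int) < (s:Int)) := by exact_mod_cast not_lt.2 hsc
  simp only [if_neg h1, if_neg h2, if_neg h3, if_neg h4, Int.toNat_natCast]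
  have : "\n".toList = ['\n'] := rfl
  rw [this]

theorem endA_eq_ref (text : String) (s c : Nat) (hsc : s < c)
    (hcl : c < text.toList.length) :
    (if (s:Int) < PySem.Str.rfindFrom text "\n" (s:Int) (some (c:Int))
     then PySem.Str.rfindFrom text "\n" (s:Int) (some (c:Int)) + 1 else (c:Int))
    = refEnd text.toList s c := by
  set cs := text.toList with hcs
  have hlen : ((cs.take c).drop s).length = c - s := by
    simp [List.length_drop, List.length_take]
    omega
  have hidx : ∀ j : Nat, ((cs.take c).drop s)[j]? = if s + j < c then cs[s+j]? else none := by
    intro j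
    rw [List.getElem?_drop, List.getElem?_take]
  have hrw : PySem.Chars.rfind ((cs.take c).drop s) ['\n']
      = PySem.Chars.rfind.go ((cs.take c).drop s) ['\n'] (c - s) := by
    rw [PySem.Chars.rfind, hlen]
  rw [rfindFrom_unfold text s c (le_of_lt hsc) (le_of_lt hcl), hrw]
  rcases rfind_go_spec (c - s) ((cs.take c).drop s) with ⟨hgo, hnone⟩ | ⟨j, hj, hgo, hnl, hmax⟩
  · rw [hgo]
    norm_num
    rw [if_neg (by omega : ¬ (s:Int) < -1)]
    refine (refEnd_none cs s c fun i h1 h2 hc => ?_).symm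
    refine hnone (i - s) (by omega) ?_
    rw [hidx]
    rw [if_pos (by omega)]
    rw [(by omega : s + (i - s) = i)]
    exact hc
  · have hjlt : j < c - s := by
      by_contra hge
      have : ((cs.take c).drop s)[j]? = none := by
        apply List.getElem?_eq_none
        omega
      rw [this] at hnl
      simp at hnl
    have habs : cs[s + j]? = some '\n' := by
      rw [hidx, if_pos (by omega)] at hnl
      exact hnl
    rw [hgo]
    rw [if_neg (by omega : ¬ ((j:Int) = -1))]
    by_cases hj0 : j = 0
    · subst hj0
      rw [if_neg (by push_cast; omega : ¬ ((s:Int) < (s:Int) + ((0:Nat):Int)))]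
      refine (refEnd_none cs s c fun i h1 h2 hc => ?_).symm
      refine hmax (i - s) (by omega) (by omega) ?_
      rw [hidx, if_pos (by omega), (by omega : s + (i - s) = i)]
      exact hc
    · rw [if_pos (by omega : (s:Int) < (s:Int) + (j:Int))]
      rw [(refEnd_some cs s c (s + j) (by omega) (by omega) habs ?_)]
      · push_cast; ring
      · intro i h1 h2 hc
        by_contra hgt
        refine hmax (i - s) (by omega) (by omega) ?_
        rw [hidx, if_pos (by omega), (by omega : s + (i - s) = i)]
        exact hc

theorem nlAux_mem : ∀ (cs : List Char) (k i : Int),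
    (i ∈ (PySem.List.enumerate cs k).filterMap (fun p => if p.2 = '\n' then some p.1 else none))
    ↔ ∃ j : Nat, i = k + j ∧ cs[j]? = some '\n' := by
  intro cs
  induction cs with
  | nil => intro k i; simp [PySem.List.enumerate]
  | cons c t ih =>
    intro k i
    simp only [PySem.List.enumerate, List.filterMap_cons]
    by_cases hc : c = '\n'
    · simp only [if_pos hc, List.mem_cons, ih]
      constructor
      · rintro (h | ⟨j, hj, hnl⟩)
        · exact ⟨0, by simpa using h, by simpa [hc]⟩
        · exact ⟨j + 1, by push_cast; omega, by simpa using hnl⟩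
      · rintro ⟨j, hj, hnl⟩
        cases j with
        | zero => left; simpa using hj
        | succ j => right; exact ⟨j, by push_cast at hj ⊢; omega, by simpa using hnl⟩
    · simp only [if_neg hc, ih]
      constructor
      · rintro ⟨j, hj, hnl⟩
        exact ⟨j + 1, by push_cast; omega, by simpa using hnl⟩
      · rintro ⟨j, hj, hnl⟩
        cases j with
        | zero => exact absurd (by simpa using hnl) hc
        | succ j => exact ⟨j, by push_cast at hj ⊢; omega, by simpa using hnl⟩

theorem nlAux_sorted : ∀ (cs : List Char) (k : Int),
    ((PySem.List.enumerate cs k).filterMap (fun p => if p.2 = '\n' then some p.1 else none)).Pairwise (· < ·) := by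
  intro cs
  induction cs with
  | nil => intro k; simp [PySem.List.enumerate]
  | cons c t ih =>
    intro k
    simp only [PySem.List.enumerate, List.filterMap_cons]
    by_cases hc : c = '\n'
    · simp only [if_pos hc]
      refine List.pairwise_cons.2 ⟨fun i hi => ?_, ih (k+1)⟩
      obtain ⟨j, hj, -⟩ := (nlAux_mem t (k+1) i).1 hi
      omega
    · simpa only [if_neg hc] using ih (k+1)

theorem nl_mem (text : String) (i : Int) :
    i ∈ newlinePositions text ↔ ∃ j : Nat, i = (j : Int) ∧ text.toList[j]? = some '\n' := by
  simpa [newlinePositions] using nlAux_mem text.toList 0 i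

theorem nl_sorted (text : String) : (newlinePositions text).Pairwise (· < ·) :=
  nlAux_sorted text.toList 0

theorem bsearchB_spec (nl : List Int) (cap : Int)
    (hmono : ∀ i j : Nat, i ≤ j → j < nl.length → nl.getD i 0 ≤ nl.getD j 0) :
    ∀ (lo hi : Nat), lo ≤ hi → hi ≤ nl.length →
    lo ≤ bsearchB nl cap lo hi ∧ bsearchB nl cap lo hi ≤ hi ∧
    (∀ j, lo ≤ j → j < bsearchB nl cap lo hi → nl.getD j 0 < cap) ∧
    (∀ j, bsearchB nl cap lo hi ≤ j → j < hi → ¬ nl.getD j 0 < cap) := by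
  intro lo hi
  induction lo, hi using bsearchB.induct nl cap with
  | case1 lo hi h mid hmid ih =>
    intro hlh hhn
    have hm : mid = (lo + hi) / 2 := rfl
    rw [bsearchB]
    simp only [dif_pos h]
    rw [if_pos (show nl.getD ((lo+hi)/2) 0 < cap from hmid)]
    rw [← hm]
    obtain ⟨i1, i2, i3, i4⟩ := ih (by omega) hhn
    refine ⟨by omega, i2, fun j h1 h2 => ?_, i4⟩
    by_cases hj : (lo + hi) / 2 + 1 ≤ j
    · exact i3 j hj h2
    · calc nl.getD j 0 ≤ nl.getD ((lo+hi)/2) 0 := hmono _ _ (by omega) (by omega)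
        _ < cap := hmid
  | case2 lo hi h mid hmid ih =>
    intro hlh hhn
    have hm : mid = (lo + hi) / 2 := rfl
    rw [bsearchB]
    simp only [dif_pos h]
    rw [if_neg (show ¬ nl.getD ((lo+hi)/2) 0 < cap from hmid)]
    rw [← hm]
    obtain ⟨i1, i2, i3, i4⟩ := ih (by omega) (by omega)
    refine ⟨i1, by omega, i3, fun j h1 h2 => ?_⟩
    by_cases hj : j < (lo + hi) / 2
    · exact i4 j h1 hj
    · intro hc
      exact hmid (lt_of_le_of_lt (hmono _ _ (by omega) (by omega)) hc)
  | case3 lo hi h =>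
    intro hlh hhn
    rw [bsearchB]
    simp only [dif_neg h]
    exact ⟨le_rfl, hlh, fun j h1 h2 => by omega, fun j h1 h2 => by omega⟩

theorem endB_eq_ref (text : String) (s c : Nat) (hsc : s < c)
    (hcl : c < text.toList.length) :
    (if 0 < bsearchB (newlinePositions text) (c:Int) 0 (newlinePositions text).length then
       (if (s:Int) < (newlinePositions text).getD (bsearchB (newlinePositions text) (c:Int) 0 (newlinePositions text).length - 1) 0
        then (newlinePositions text).getD (bsearchB (newlinePositions text) (c:Int) 0 (newlinePositions text).length - 1) 0 + 1
        else (c:Int))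
     else (c:Int))
    = refEnd text.toList s c := by
  set cs := text.toList with hcs
  set nl := newlinePositions text with hnl
  have hpw : ∀ (i j : Nat) (hi : i < nl.length) (hj : j < nl.length), i < j → nl[i] < nl[j] :=
    fun i j hi hj hij => List.pairwise_iff_getElem.1 (nl_sorted text) i j hi hj hij
  have hmono : ∀ i j : Nat, i ≤ j → j < nl.length → nl.getD i 0 ≤ nl.getD j 0 := by
    intro i j hij hj
    rcases Nat.lt_or_ge i j with h | h
    · rw [List.getD_eq_getElem _ _ (by omega), List.getD_eq_getElem _ _ hj]
      exact le_of_lt (hpw i j (by omega) hj h)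
    · have : i = j := by omega
      subst this; rfl
  obtain ⟨-, hle, hlt, hge⟩ := bsearchB_spec nl (c:Int) hmono 0 nl.length (Nat.zero_le _) le_rfl
  have hmemidx : ∀ i : Nat, cs[i]? = some '\n' → ∃ (idx : Nat) (h : idx < nl.length), nl[idx] = (i:Int) := by
    intro i hi
    have : (i:Int) ∈ nl := (nl_mem text (i:Int)).2 ⟨i, rfl, hi⟩
    obtain ⟨idx, hidx, he⟩ := List.mem_iff_getElem.1 this
    exact ⟨idx, hidx, he⟩
  set lo0 := bsearchB nl (c:Int) 0 nl.length with hlo0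
  by_cases h0 : 0 < lo0
  · rw [if_pos h0]
    have hplt : nl.getD (lo0 - 1) 0 < (c:Int) := hlt (lo0 - 1) (Nat.zero_le _) (by omega)
    have hpg : nl.getD (lo0 - 1) 0 = nl[lo0 - 1]'(by omega) := List.getD_eq_getElem _ _ (by omega)
    have hpmem : nl[lo0 - 1]'(by omega) ∈ nl := List.getElem_mem _
    obtain ⟨jp, hjp, hjnl⟩ := (nl_mem text _).1 hpmem
    have hmaxp : ∀ i : Nat, cs[i]? = some '\n' → i < c → (i:Int) ≤ nl.getD (lo0 - 1) 0 := by
      intro i hi hic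
      obtain ⟨idx, hidxlt, he⟩ := hmemidx i hi
      rcases Nat.lt_or_ge idx lo0 with hcase | hcase
      · rcases Nat.lt_or_ge idx (lo0 - 1) with hc2 | hc2
        · rw [hpg, ← he]
          exact le_of_lt (hpw idx (lo0-1) hidxlt (by omega) hc2)
        · have : idx = lo0 - 1 := by omega
          subst this
          rw [hpg, ← he]
      · exfalso
        have := hge idx hcase hidxlt
        rw [List.getD_eq_getElem _ _ hidxlt, he] at this
        exact this (by exact_mod_cast hic)
    by_cases hsp : (s:Int) < nl.getD (lo0 - 1) 0
    · rw [if_pos hsp]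
      have hjpc : jp < c := by
        rw [hpg] at hplt; rw [hjp] at hplt; exact_mod_cast hplt
      have hsjp : s < jp := by
        rw [hpg, hjp] at hsp; exact_mod_cast hsp
      rw [refEnd_some cs s c jp hsjp hjpc hjnl]
      · rw [hpg, hjp]
      · intro i h1 h2 hcnl
        have := hmaxp i hcnl h2
        rw [hpg, hjp] at this
        exact_mod_cast this
    · rw [if_neg hsp]
      refine (refEnd_none cs s c fun i h1 h2 hcnl => ?_).symm
      have := hmaxp i hcnl h2
      omega
  · rw [if_neg h0]
    refine (refEnd_none cs s c fun i h1 h2 hcnl => ?_).symm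
    obtain ⟨idx, hidxlt, he⟩ := hmemidx i hcnl
    have := hge idx (by omega) hidxlt
    rw [List.getD_eq_getElem _ _ hidxlt, he] at this
    exact this (by exact_mod_cast h2)

theorem go_eq (text : String) (mc : Int) (hmc : 1 ≤ mc) :
    ∀ (fuel : Nat) (start : Int), 0 ≤ start →
    splitA_go text mc start fuel = splitB_go text (newlinePositions text) mc start fuel := by
  intro fuel
  induction fuel with
  | zero => intro start _; rfl
  | succ fuel ih =>
    intro start hstart
    have hlenI : PySem.Str.len text = (text.toList.length : Int) := by
      simp [PySem.Str.len]
    rw [splitA_go, splitB_go]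
    simp only []
    by_cases h : start < PySem.Str.len text
    · rw [if_pos h, if_pos h]
      have hcapcases : min (start + mc) (PySem.Str.len text) ≤ PySem.Str.len text := min_le_right _ _
      by_cases hcl : min (start + mc) (PySem.Str.len text) < PySem.Str.len text
      · -- non-final window: both sides compute refEnd
        have hne : ¬ (min (start + mc) (PySem.Str.len text) == PySem.Str.len text) = true := by
          simp only [beq_iff_eq]
          omega
        rw [if_pos hcl, if_neg hne]
        obtain ⟨s, rfl⟩ : ∃ s : Nat, start = (s : Int) := ⟨start.toNat, (Int.toNat_of_nonneg hstart).symm⟩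
        have hcnn : 0 ≤ min ((s:Int) + mc) (PySem.Str.len text) := by
          rw [hlenI] at h ⊢
          omega
        obtain ⟨c, hc⟩ : ∃ c : Nat, min ((s:Int) + mc) (PySem.Str.len text) = (c : Int) :=
          ⟨(min ((s:Int) + mc) (PySem.Str.len text)).toNat, (Int.toNat_of_nonneg hcnn).symm⟩
        rw [hc]
        have hsc : s < c := by
          have hlt : (s:Int) < min ((s:Int) + mc) (PySem.Str.len text) :=
            lt_min (by omega) h
          rw [hc] at hlt
          exact_mod_cast hlt
        have hclN : c < text.toList.length := by
          rw [hc, hlenI] at hcl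
          exact_mod_cast hcl
        have key : (if (s:Int) < PySem.Str.rfindFrom text "\n" (s:Int) (some (c:Int))
            then PySem.Str.rfindFrom text "\n" (s:Int) (some (c:Int)) + 1 else (c:Int))
            = (if 0 < bsearchB (newlinePositions text) (c:Int) 0 (newlinePositions text).length then
                 (if (s:Int) < (newlinePositions text).getD (bsearchB (newlinePositions text) (c:Int) 0 (newlinePositions text).length - 1) 0
                  then (newlinePositions text).getD (bsearchB (newlinePositions text) (c:Int) 0 (newlinePositions text).length - 1) 0 + 1
                  else (c:Int))
               else (c:Int)) := by
          rw [endA_eq_ref text s c hsc hclN, endB_eq_ref text s c hsc hclN]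
        rw [key]
        have hnn : 0 ≤ (if 0 < bsearchB (newlinePositions text) (c:Int) 0 (newlinePositions text).length then
                 (if (s:Int) < (newlinePositions text).getD (bsearchB (newlinePositions text) (c:Int) 0 (newlinePositions text).length - 1) 0
                  then (newlinePositions text).getD (bsearchB (newlinePositions text) (c:Int) 0 (newlinePositions text).length - 1) 0 + 1
                  else (c:Int))
               else (c:Int)) := by
          rw [endB_eq_ref text s c hsc hclN]
          exact refEnd_nonneg text.toList s c
        rw [ih _ hnn]
      · -- final window: cap = length on both sides
        have hceq : min (start + mc) (PySem.Str.len text) = PySem.Str.len text := by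
          omega
        have heq : (min (start + mc) (PySem.Str.len text) == PySem.Str.len text) = true := by
          simp only [beq_iff_eq]
          exact hceq
        rw [if_neg hcl, if_pos heq, hceq]
        rw [ih _ (by rw [hlenI]; exact Int.natCast_nonneg _)]
    · rw [if_neg h, if_neg h]

-- ===== VERDICT (by name: the statement is the Claim_ definition above) =====
theorem split_at_boundary_py_spec : Claim_equal_split_at_boundary_py := by
  intro text mc _ hpre
  unfold Spec_split_at_boundary_py split_at_boundary_py split_at_boundary_py_alt
  rcases hpre with h | h
  · subst h
    simp [splitA_go, splitB_go]
  · exact go_eq text mc h _ 0 le_rfl
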